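-- pv_equiv track=rewrite | github.com/admiralbolt/stream-stuff | stream_backend/api/twitch_bot/alert_handler.py | get_bits_gif_url
-- ===== SOURCE A (Python) =====
-- BIT_GIF_BASE = "https://d3aqoihi2n8ty8.cloudfront.net/actions/cheer/dark/animated/%s/%s.gif"
--
-- ANON_BIT_GIF_BASE = "https://d3aqoihi2n8ty8.cloudfront.net/actions/anon/dark/animated/%s/%s.gif"
--
-- BIT_THRESHOLDS = [1, 100, 1000, 5000, 10000]
--
-- def get_bits_gif_url(bits_used, size, anon=False):
--   """Gets a gif url for a given bit value."""
--   bit_threshold = 1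
--   for thresh in BIT_THRESHOLDS:
--     if bits_used > thresh:
--       bit_threshold = thresh
--     else:
--       break
--   return (ANON_BIT_GIF_BASE if anon else BIT_GIF_BASE) % (bit_threshold, size)
-- ===== SOURCE B (Python) =====
-- BIT_GIF_BASE = "https://d3aqoihi2n8ty8.cloudfront.net/actions/cheer/dark/animated/%s/%s.gif"
--
-- ANON_BIT_GIF_BASE = "https://d3aqoihi2n8ty8.cloudfront.net/actions/anon/dark/animated/%s/%s.gif"
--
-- BIT_THRESHOLDS = [1, 100, 1000, 5000, 10000]
--
-- def get_bits_gif_url(bits_used, size, anon=False):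
--   """Gets a gif url for a given bit value (binary search over the sorted tiers)."""
--   lo, hi = 0, len(BIT_THRESHOLDS)
--   while lo < hi:
--     mid = (lo + hi) // 2
--     if BIT_THRESHOLDS[mid] < bits_used:
--       lo = mid + 1
--     else:
--       hi = mid
--   idx = lo - 1
--   bit_threshold = BIT_THRESHOLDS[idx] if idx >= 0 else 1
--   return (ANON_BIT_GIF_BASE if anon else BIT_GIF_BASE) % (bit_threshold, size)
-- ===== Notes on version B (the rewrite author's own statement) =====
-- stated objective: idiomatic
-- what changed: Replaces A's sequential scan-with-break over BIT_THRESHOLDS by a bisect_left-style binary search over the sorted tier table, then indexes the tier directly (defaulting to 1 when the index is -1).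
import Mathlib
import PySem

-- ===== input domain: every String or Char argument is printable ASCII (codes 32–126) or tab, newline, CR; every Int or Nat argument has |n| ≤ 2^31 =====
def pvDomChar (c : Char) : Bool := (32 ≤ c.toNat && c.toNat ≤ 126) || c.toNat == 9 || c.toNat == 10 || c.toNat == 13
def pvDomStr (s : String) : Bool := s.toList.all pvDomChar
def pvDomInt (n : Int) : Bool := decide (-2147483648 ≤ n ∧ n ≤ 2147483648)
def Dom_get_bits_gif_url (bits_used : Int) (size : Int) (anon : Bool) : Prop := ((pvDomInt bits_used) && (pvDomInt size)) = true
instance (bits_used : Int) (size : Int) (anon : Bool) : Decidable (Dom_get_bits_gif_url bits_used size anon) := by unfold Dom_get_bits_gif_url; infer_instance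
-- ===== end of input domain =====

-- B replaces A's sequential scan-with-break over BIT_THRESHOLDS by a bisect_left-style
-- binary search over the sorted table (objective: idiomatic/alternative; same tiny cost).

-- shared module constants: the two format strings split at their %s slots, and the tier table
def pvBitGifPre : String := "https://d3aqoihi2n8ty8.cloudfront.net/actions/cheer/dark/animated/"
def pvAnonBitGifPre : String := "https://d3aqoihi2n8ty8.cloudfront.net/actions/anon/dark/animated/"
-- '%s' % int renders as str(int); exact via PySem.Int.toStr
def pvFmt (pre : String) (bt size : Int) : String :=
  pre ++ PySem.Int.toStr bt ++ "/" ++ PySem.Int.toStr size ++ ".gif"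
def BIT_THRESHOLDS : List Int := [1, 100, 1000, 5000, 10000]

-- ===== PORT A =====
-- A's for-loop with break: walk the list, updating bit_threshold while bits_used > thresh
def pvALoop (bits_used : Int) : List Int → Int → Int
  | [], bt => bt
  | t :: rest, bt => if bits_used > t then pvALoop bits_used rest t else bt

def get_bits_gif_url (bits_used : Int) (size : Int) (anon : Bool) : String :=
  let bit_threshold := pvALoop bits_used BIT_THRESHOLDS 1
  pvFmt (if anon then pvAnonBitGifPre else pvBitGifPre) bit_threshold size

-- ===== PORT B =====
-- B's while-loop binary search (bisect_left); fuel = list length bounds the loop (guard only)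
def pvBLoop (bits_used : Int) (a : List Int) : Nat → Int → Int → Int
  | 0, lo, _ => lo
  | n + 1, lo, hi =>
    if lo < hi then
      let mid := PySem.Int.floordiv (lo + hi) 2
      if (PySem.List.pyGet? a mid).getD 0 < bits_used then
        pvBLoop bits_used a n (mid + 1) hi
      else
        pvBLoop bits_used a n lo mid
    else lo

def get_bits_gif_url_alt (bits_used : Int) (size : Int) (anon : Bool) : String :=
  let lo := pvBLoop bits_used BIT_THRESHOLDS BIT_THRESHOLDS.length 0 (BIT_THRESHOLDS.length : Int)
  let idx := lo - 1
  let bit_threshold := if idx ≥ 0 then (PySem.List.pyGet? BIT_THRESHOLDS idx).getD 0 else 1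
  pvFmt (if anon then pvAnonBitGifPre else pvBitGifPre) bit_threshold size

-- ===== PRECONDITION & SPEC =====
def Spec_get_bits_gif_url (bits_used : Int) (size : Int) (anon : Bool) (out : String) : Prop := out = get_bits_gif_url_alt bits_used size anon
instance (bits_used : Int) (size : Int) (anon : Bool) (out : String) : Decidable (Spec_get_bits_gif_url bits_used size anon out) := by unfold Spec_get_bits_gif_url; infer_instance

-- ===== CLAIM (what is proved, stated in full; the proofs are below) =====
def Claim_equal_get_bits_gif_url : Prop := ∀ (bits_used : Int) (size : Int) (anon : Bool), Dom_get_bits_gif_url bits_used size anon → Spec_get_bits_gif_url bits_used size anon (get_bits_gif_url bits_used size anon)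

-- ===== LEMMAS AND PROOFS =====
-- concrete-table evaluation facts (literal list, literal indices)
theorem pv_fd52 : PySem.Int.floordiv 5 2 = 2 := by decide
theorem pv_fd82 : PySem.Int.floordiv 8 2 = 4 := by decide
theorem pv_fd22 : PySem.Int.floordiv 2 2 = 1 := by decide
theorem pv_fd72 : PySem.Int.floordiv 7 2 = 3 := by decide
theorem pv_fd12 : PySem.Int.floordiv 1 2 = 0 := by decide


theorem pv_tier_eq (x : Int) :
    pvALoop x BIT_THRESHOLDS 1 =
      (let lo := pvBLoop x BIT_THRESHOLDS BIT_THRESHOLDS.length 0 (BIT_THRESHOLDS.length : Int)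
       let idx := lo - 1
       if idx ≥ 0 then (PySem.List.pyGet? BIT_THRESHOLDS idx).getD 0 else 1) := by
  simp only [BIT_THRESHOLDS, List.length] at *
  simp only [pvBLoop, pvALoop]
  norm_num [pv_fd52, pv_fd82, pv_fd22, pv_fd72, pv_fd12]
  split_ifs <;> simp_all <;> omega

-- ===== VERDICT (by name: the statement is the Claim_ definition above) =====
theorem get_bits_gif_url_spec : Claim_equal_get_bits_gif_url := by
  intro bits_used size anon _
  unfold Spec_get_bits_gif_url get_bits_gif_url get_bits_gif_url_alt
  rw [pv_tier_eq]
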